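-- pv_equiv track=rewrite | github.com/junyeong-nero/ps | programmers/greedy/기지국-설치.py | solution
-- ===== SOURCE A (Python) =====
-- import math
--
-- def solution(n, stations, w):
--
--     # 커버하지 못하는 구역의 길이를 확인 -> 길이를 2w + 1 으로 나누면 될듯?
--
--     prefix = dict()
--     for station in stations:
--         prefix[station - w] = prefix.get(station - w, 0) + 1
--         prefix[station + w + 1] = prefix.get(station + w + 1, 0) - 1
--
--     hist = []
--     prev = 1
--     curr = 0
--     for pos in sorted(prefix.keys()):
--         if curr == 0:
--             hist.append((prev, pos))
--
--         prev = pos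
--         curr += prefix[pos]
--
--     if prev < n + 1:
--         hist.append((prev, n + 1))
--
--     res = 0
--     for a, b in hist:
--         res += math.ceil((b - a) / (2 * w + 1))
--
--     return res
-- ===== SOURCE B (Python) =====
-- def solution(n, stations, w):
--     # One linear pass over the sorted stations: track the first position not yet
--     # covered and count ceil(gap / (2w+1)) new stations for each uncovered gap.
--     reach = 2 * w + 1
--     res = 0
--     covered = 1  # every position left of this one is already covered
--     for s in sorted(stations):
--         lo = s - w
--         if lo > covered:
--             gap = lo - covered
--             res += (gap + reach - 1) // reach
--         covered = s + w + 1
--     if covered <= n: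
--         gap = n + 1 - covered
--         res += (gap + reach - 1) // reach
--     return res
-- ===== Notes on version B (the rewrite author's own statement) =====
-- stated objective: simpler
-- what changed: A builds a coverage-delta dict keyed by interval endpoints, sweeps its sorted keys with a counter to collect uncovered-gap pairs and then sums ceilings over that list; B makes one linear pass over the sorted stations, tracking the first uncovered position and adding ceil(gap/(2w+1)) per gap directly, with no dict, no event sweep and no intermediate gap list. Pre_ restricts to the task's natural domain: nonnegative coverage width w and stations whose coverage interval reaches position 1 (s > -w; in the original problem 1 <= stations <= n); …
-- outside the precondition, e.g. on solution(1, [1], -5): A returns 1, B returns 0; on solution(5, [-3], 1): A returns 2, B returns 3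
import Mathlib
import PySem

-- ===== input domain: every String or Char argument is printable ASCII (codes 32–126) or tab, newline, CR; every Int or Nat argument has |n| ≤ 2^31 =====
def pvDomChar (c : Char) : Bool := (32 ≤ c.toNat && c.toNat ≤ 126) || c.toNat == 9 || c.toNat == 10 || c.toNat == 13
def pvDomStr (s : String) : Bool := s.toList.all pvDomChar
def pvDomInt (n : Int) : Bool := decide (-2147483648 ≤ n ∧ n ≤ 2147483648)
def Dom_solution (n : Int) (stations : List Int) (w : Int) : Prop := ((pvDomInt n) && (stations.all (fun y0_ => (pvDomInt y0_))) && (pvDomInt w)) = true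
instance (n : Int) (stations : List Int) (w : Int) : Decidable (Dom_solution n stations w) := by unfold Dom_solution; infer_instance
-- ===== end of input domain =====

-- B replaces A's delta-dict + sorted-event-key sweep + intermediate gap list by a single
-- linear pass over the sorted stations, on the problem's natural domain stated in Pre_.

-- ===== PORT A =====
-- A-side helpers (the three phases of A's body, transliterated)
def solBuild (w : Int) (stations : List Int) : PySem.Dict Int Int :=
  stations.foldl (fun d station =>
    let d1 := d.insert (station - w) (d.getD (station - w) 0 + 1)
    d1.insert (station + w + 1) (d1.getD (station + w + 1) 0 - 1)) PySem.Dict.empty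

def AStep (δ : Int → Int) (st : List (Int × Int) × Int × Int) (pos : Int) :
    List (Int × Int) × Int × Int :=
  (if st.2.2 = 0 then st.1 ++ [(st.2.1, pos)] else st.1, pos, st.2.2 + δ pos)

-- math.ceil((b - a) / (2*w + 1)) : exact integer ceiling; exact on the stated |·| ≤ 2^31
-- domain, where the float quotient is fine enough to have the same ceiling.
def solCeil (w : Int) (a b : Int) : Int := -(PySem.Int.floordiv (-(b - a)) (2 * w + 1))

def solution (n : Int) (stations : List Int) (w : Int) : Int :=
  let pre := solBuild w stations
  let sw := (PySem.List.sorted pre.keys (fun k => k)).foldl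
      (AStep (fun pos => pre.getD pos 0)) ([], 1, 0)
  let hist := if sw.2.1 < n + 1 then sw.1 ++ [(sw.2.1, n + 1)] else sw.1
  hist.foldl (fun res ab => res + solCeil w ab.1 ab.2) 0

-- ===== PORT B =====
def solution_alt (n : Int) (stations : List Int) (w : Int) : Int :=
  let reach := 2 * w + 1
  let fin := (PySem.List.sorted stations (fun s => s)).foldl
    (fun (st : Int × Int) s =>
      let lo := s - w
      (if st.2 < lo then st.1 + PySem.Int.floordiv (lo - st.2 + reach - 1) reach else st.1,
       s + w + 1))
    ((0 : Int), (1 : Int))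
  if fin.2 ≤ n then fin.1 + PySem.Int.floordiv (n + 1 - fin.2 + reach - 1) reach else fin.1

-- ===== PRECONDITION & SPEC =====
-- Pre_ restricts to the task's natural domain: nonnegative coverage width w and stations whose
-- coverage interval reaches position 1 (-w < s; in the original problem 1 ≤ s ≤ n); outside it
-- A still returns a value, which B, the natural algorithm for the task, does not reproduce.
def Pre_solution (n : Int) (stations : List Int) (w : Int) : Prop :=
  0 ≤ w ∧ ∀ s ∈ stations, -w < s
instance (n : Int) (stations : List Int) (w : Int) : Decidable (Pre_solution n stations w) := by
  unfold Pre_solution; infer_instance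
def pvWitness_solution : Int × List Int × Int := (11, [4, 11], 1)
def Spec_solution (n : Int) (stations : List Int) (w : Int) (out : Int) : Prop := out = solution_alt n stations w
instance (n : Int) (stations : List Int) (w : Int) (out : Int) : Decidable (Spec_solution n stations w out) := by unfold Spec_solution; infer_instance

-- ===== CLAIM (what is proved, stated in full; the proofs are below) =====
def Claim_equal_solution : Prop := ∀ (n : Int) (stations : List Int) (w : Int), Dom_solution n stations w → Pre_solution n stations w → Spec_solution n stations w (solution n stations w)

-- ===== LEMMAS AND PROOFS =====

-- interval of a station: [ivLo, ivHi), always nonempty (width |2w+1| ≥ 1)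
def ivLo (w s : Int) : Int := min (s - w) (s + w + 1)
def ivHi (w s : Int) : Int := max (s - w) (s + w + 1)

def events (w : Int) (ss : List Int) : List Int := ss.flatMap (fun s => [s - w, s + w + 1])

def Kof (w : Int) (ss : List Int) : List Int :=
  PySem.List.sorted (PySem.Set.ofList (events w ss)) (fun k => k)

-- signed coverage: #(s - w ≤ x) - #(s + w + 1 ≤ x); zero exactly on uncovered points
def Cf (w : Int) (ss : List Int) (x : Int) : Int :=
  (ss.countP (fun s => decide (s - w ≤ x)) : Int) - (ss.countP (fun s => decide (s + w + 1 ≤ x)) : Int)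

-- the dict's value at a key
def dOf (w : Int) (ss : List Int) (v : Int) : Int :=
  ((ss.map (fun s => s - w)).count v : Int) - ((ss.map (fun s => s + w + 1)).count v : Int)

-- gap pairs appended by the sweep
def gpGo (f : Int → Int) : Int → List Int → List (Int × Int)
  | _, [] => []
  | p, k :: ks => (if f p = 0 then [(p, k)] else []) ++ gpGo f k ks

def gp (f : Int → Int) (K : List Int) : List (Int × Int) :=
  match K with
  | [] => []
  | k :: ks => (1, k) :: gpGo f k ks

def sumg (w : Int) (g : List (Int × Int)) : Int := (g.map (fun ab => solCeil w ab.1 ab.2)).sum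

def finishOf (n w : Int) (g : List (Int × Int)) (cur : Int) : Int :=
  sumg w (if cur < n + 1 then g ++ [(cur, n + 1)] else g)

def BgStep (w : Int) (st : List (Int × Int) × Int × Bool) (s : Int) :
    List (Int × Int) × Int × Bool :=
  (if st.2.2 = true ∨ st.2.1 < ivLo w s then st.1 ++ [(st.2.1, ivLo w s)] else st.1, ivHi w s, false)

def BgFold (w : Int) (ss : List Int) : List (Int × Int) × Int × Bool :=
  ss.foldl (BgStep w) ([], 1, true)

-- B's flag-free pass, in terms of the interval endpoints
def NStep (w : Int) (st : List (Int × Int) × Int) (s : Int) : List (Int × Int) × Int :=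
  (if st.2 < ivLo w s then st.1 ++ [(st.2, ivLo w s)] else st.1, ivHi w s)

-- ---------- arithmetic on intervals ----------
theorem ivLo_lt_ivHi (w s : Int) : ivLo w s < ivHi w s := by
  unfold ivLo ivHi; omega
theorem ivLo_mono (w s t : Int) (h : s ≤ t) : ivLo w s ≤ ivLo w t := by unfold ivLo; omega
theorem ivHi_mono (w s t : Int) (h : s ≤ t) : ivHi w s ≤ ivHi w t := by unfold ivHi; omega
theorem lohi_set (w s x : Int) : (x = s - w ∨ x = s + w + 1) ↔ (x = ivLo w s ∨ x = ivHi w s) := by unfold ivLo ivHi; omega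
theorem ivLo_of_nonneg (w s : Int) (hw : 0 ≤ w) : ivLo w s = s - w := by unfold ivLo; omega
theorem ivHi_of_nonneg (w s : Int) (hw : 0 ≤ w) : ivHi w s = s + w + 1 := by unfold ivHi; omega

-- B's ceiling form equals A's ceiling form, for positive modulus
theorem ceil_eq (w a b : Int) (hw : 0 ≤ w) :
    PySem.Int.floordiv (b - a + (2 * w + 1) - 1) (2 * w + 1) = solCeil w a b := by
  have hm : (0 : Int) < 2 * w + 1 := by omega
  have h1 := (PySem.Int.floordiv_eq_iff_of_pos hm
    (a := b - a + (2 * w + 1) - 1)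
    (q := PySem.Int.floordiv (b - a + (2 * w + 1) - 1) (2 * w + 1))).1 rfl
  unfold solCeil
  exact ((PySem.Int.neg_floordiv_neg_eq_iff_of_pos hm).2 ⟨by nlinarith [h1.1, h1.2], by nlinarith [h1.1, h1.2]⟩).symm

-- the forced first gap term of A is zero on the natural domain
theorem first_gap_zero (w s : Int) (hw : 0 ≤ w) (hs : -w < s) (hle : ¬ 1 < ivLo w s) :
    solCeil w 1 (ivLo w s) = 0 := by
  rw [ivLo_of_nonneg w s hw] at *
  have hm : (0 : Int) < 2 * w + 1 := by omega
  unfold solCeil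
  have h0 : PySem.Int.floordiv (-(s - w - 1)) (2 * w + 1) = 0 := by
    rw [PySem.Int.floordiv_eq_iff_of_pos hm]
    constructor <;> omega
  rw [h0]; ring


-- ---------- events ----------
theorem mem_events (w : Int) (ss : List Int) (x : Int) :
    x ∈ events w ss ↔ ∃ s ∈ ss, x = s - w ∨ x = s + w + 1 := by
  simp only [events, List.mem_flatMap, List.mem_cons]
  constructor
  · rintro ⟨s, hs, h⟩; exact ⟨s, hs, by tauto⟩
  · rintro ⟨s, hs, h⟩; exact ⟨s, hs, by tauto⟩
theorem events_append (w : Int) (ss : List Int) (s : Int) :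
    events w (ss ++ [s]) = events w ss ++ [s - w, s + w + 1] := by
  simp [events, List.flatMap_append]

-- ---------- Cf facts ----------
theorem countP_lt_of_witness (l : List Int) (p q : Int → Bool)
    (hm : ∀ a ∈ l, q a = true → p a = true) (t : Int) (ht : t ∈ l)
    (hp : p t = true) (hq : q t = false) : l.countP q < l.countP p := by
  induction l with
  | nil => cases ht
  | cons a l ih =>
    rw [List.countP_cons, List.countP_cons]
    rcases List.mem_cons.mp ht with rfl | htl
    · have hle : l.countP q ≤ l.countP p :=
        List.countP_mono_left (fun x hx hq => hm x (List.mem_cons_of_mem _ hx) hq)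
      simp [hp, hq]; omega
    · have hlt := ih (fun x hx => hm x (List.mem_cons_of_mem _ hx)) htl
      have hha := hm a (List.mem_cons_self)
      by_cases hqa : q a = true
      · simp [hqa, hha hqa]; omega
      · simp [hqa]; split <;> omega
theorem Czero_low (w : Int) (ss : List Int) (x : Int)
    (h : ∀ s ∈ ss, ¬(s - w ≤ x) ∧ ¬(s + w + 1 ≤ x)) : Cf w ss x = 0 := by
  have h1 : ss.countP (fun s => decide (s - w ≤ x)) = 0 :=
    List.countP_eq_zero.2 (by intro a ha; simpa using (h a ha).1)
  have h2 : ss.countP (fun s => decide (s + w + 1 ≤ x)) = 0 :=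
    List.countP_eq_zero.2 (by intro a ha; simpa using (h a ha).2)
  unfold Cf; rw [h1, h2]; simp
theorem Czero_high (w : Int) (ss : List Int) (x : Int)
    (h : ∀ s ∈ ss, s - w ≤ x ∧ s + w + 1 ≤ x) : Cf w ss x = 0 := by
  have h1 : ss.countP (fun s => decide (s - w ≤ x)) = ss.length :=
    List.countP_eq_length.2 (by intro a ha; simpa using (h a ha).1)
  have h2 : ss.countP (fun s => decide (s + w + 1 ≤ x)) = ss.length :=
    List.countP_eq_length.2 (by intro a ha; simpa using (h a ha).2)
  unfold Cf; rw [h1, h2]; omega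
theorem Ccover (w : Int) (ss : List Int) (x t : Int) (ht : t ∈ ss)
    (h1 : ivLo w t ≤ x) (h2 : x < ivHi w t) : Cf w ss x ≠ 0 := by
  unfold ivLo at h1; unfold ivHi at h2
  rcases le_or_gt 0 w with hw | hw
  · have hlt := countP_lt_of_witness ss (fun s => decide (s - w ≤ x)) (fun s => decide (s + w + 1 ≤ x))
      (by intro a _ hq; simp only [decide_eq_true_eq] at *; omega) t ht
      (by simp only [decide_eq_true_eq]; omega) (by simp only [decide_eq_false_iff_not]; omega)
    unfold Cf; omega
  · have hlt := countP_lt_of_witness ss (fun s => decide (s + w + 1 ≤ x)) (fun s => decide (s - w ≤ x))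
      (by intro a _ hq; simp only [decide_eq_true_eq] at *; omega) t ht
      (by simp only [decide_eq_true_eq]; omega) (by simp only [decide_eq_false_iff_not]; omega)
    unfold Cf; omega
theorem Capp_lt (w : Int) (ss : List Int) (s x : Int) (h : x < ivLo w s) :
    Cf w (ss ++ [s]) x = Cf w ss x := by
  unfold ivLo at h
  unfold Cf
  rw [List.countP_append, List.countP_append]
  simp only [List.countP_cons, List.countP_nil, decide_eq_true_eq]
  split <;> split <;> omega
theorem Cdiff (w : Int) (ss : List Int) (a b : Int) (hab : a < b)
    (hno : ∀ s ∈ ss, ¬(a < s - w ∧ s - w < b) ∧ ¬(a < s + w + 1 ∧ s + w + 1 < b)) :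
    Cf w ss b = Cf w ss a + dOf w ss b := by
  induction ss with
  | nil => simp [Cf, dOf]
  | cons a ss ih =>
    have ihh := ih (fun s hs => hno s (List.mem_cons_of_mem _ hs))
    have hh := hno a (List.mem_cons_self)
    unfold Cf dOf at *
    simp only [List.countP_cons, List.map_cons, List.count_cons, beq_iff_eq,
      decide_eq_true_eq] at *
    push_cast at *
    split_ifs at * <;> omega

-- ---------- sorted-list helpers ----------
theorem lastD_append (X Y : List Int) (d : Int) :
    (X ++ Y).getLastD d = Y.getLastD (X.getLastD d) := by
  induction X generalizing d with
  | nil => rfl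
  | cons x X ih => rw [List.cons_append, List.getLastD_cons, ih, List.getLastD_cons]
theorem mem_getLastD (l : List Int) (d : Int) (h : l ≠ []) : l.getLastD d ∈ l := by
  induction l generalizing d with
  | nil => simp at h
  | cons a l ih =>
    rw [List.getLastD_cons]
    rcases eq_or_ne l [] with rfl | hne
    · exact List.mem_cons_self
    · exact List.mem_cons_of_mem _ (ih a hne)
theorem le_getLastD (l : List Int) (d x : Int) (hp : l.Pairwise (· < ·)) (hx : x ∈ l) :
    x ≤ l.getLastD d := by
  induction l generalizing d with
  | nil => cases hx
  | cons a l ih =>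
    rw [List.getLastD_cons]
    have ha := List.pairwise_cons.mp hp
    rcases List.mem_cons.mp hx with rfl | hxl
    · rcases eq_or_ne l [] with rfl | hne
      · exact le_refl _
      · exact le_of_lt (ha.1 _ (mem_getLastD l x hne))
    · exact ih a ha.2 hxl
theorem dropLast_lt_getLastD (l : List Int) (d x : Int) (hp : l.Pairwise (· < ·))
    (hx : x ∈ l.dropLast) : x < l.getLastD d := by
  induction l generalizing d with
  | nil => simp at hx
  | cons a l ih =>
    cases l with
    | nil => simp at hx
    | cons b t =>
      have ha := List.pairwise_cons.mp hp
      rw [List.getLastD_cons]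
      have hx' : x = a ∨ x ∈ (b :: t).dropLast := by
        have hd : (a :: b :: t).dropLast = a :: (b :: t).dropLast := rfl
        rw [hd] at hx; exact List.mem_cons.mp hx
      rcases hx' with rfl | hx2
      · exact lt_of_lt_of_le (ha.1 b List.mem_cons_self)
          (le_getLastD (b :: t) x b ha.2 List.mem_cons_self)
      · exact ih a ha.2 hx2
theorem mem_takeWhile_sorted (L : Int) (l : List Int) (hp : l.Pairwise (· < ·)) (x : Int)
    (hx : x ∈ l) (hlt : x < L) : x ∈ l.takeWhile (fun k => decide (k < L)) := by
  induction l with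
  | nil => cases hx
  | cons a l ih =>
    have ha := List.pairwise_cons.mp hp
    rcases List.mem_cons.mp hx with rfl | hxl
    · rw [List.takeWhile_cons_of_pos (by simpa using hlt)]; exact List.mem_cons_self
    · have haL : a < L := lt_trans (ha.1 x hxl) hlt
      rw [List.takeWhile_cons_of_pos (by simpa using haL)]
      exact List.mem_cons_of_mem _ (ih ha.2 hxl)
theorem mem_dropWhile_sorted (L : Int) (l : List Int) (hp : l.Pairwise (· < ·)) (x : Int)
    (hx : x ∈ l.dropWhile (fun k => decide (k < L))) : L ≤ x := by
  induction l with
  | nil => simp at hx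
  | cons a l ih =>
    have ha := List.pairwise_cons.mp hp
    by_cases haL : a < L
    · rw [List.dropWhile_cons_of_pos (by simpa using haL)] at hx
      exact ih ha.2 hx
    · rw [List.dropWhile_cons_of_neg (by simpa using haL)] at hx
      rcases List.mem_cons.mp hx with rfl | hxl
      · omega
      · have := ha.1 x hxl; omega
theorem getLastD_irrel (l : List Int) (d d2 : Int) (h : l ≠ []) :
    l.getLastD d = l.getLastD d2 := by
  cases l with
  | nil => exact absurd rfl h
  | cons a l => rw [List.getLastD_cons, List.getLastD_cons]

-- ---------- gpGo ----------
theorem gpGo_append (f : Int → Int) (X Y : List Int) (p : Int) :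
    gpGo f p (X ++ Y) = gpGo f p X ++ gpGo f (X.getLastD p) Y := by
  induction X generalizing p with
  | nil => rfl
  | cons x X ih =>
    simp only [List.cons_append, gpGo, List.getLastD_cons, ih, List.append_assoc]
theorem gpGo_nil_of (f : Int → Int) (l : List Int) (p : Int) (hp : f p ≠ 0)
    (h : ∀ x ∈ l.dropLast, f x ≠ 0) : gpGo f p l = [] := by
  induction l generalizing p with
  | nil => rfl
  | cons k l ih =>
    simp only [gpGo, if_neg hp, List.nil_append]
    cases l with
    | nil => rfl
    | cons k2 t =>
      exact ih k (h k (by rw [List.dropLast_cons₂]; exact List.mem_cons_self))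
        (fun x hx => h x (by rw [List.dropLast_cons₂]; exact List.mem_cons_of_mem _ hx))
theorem gpGo_congr (f g : Int → Int) (l : List Int) (p : Int)
    (hp : f p = 0 ↔ g p = 0) (h : ∀ x ∈ l.dropLast, (f x = 0 ↔ g x = 0)) :
    gpGo f p l = gpGo g p l := by
  induction l generalizing p with
  | nil => rfl
  | cons k l ih =>
    have hite : (if f p = 0 then [(p, k)] else []) = (if g p = 0 then [(p, k)] else []) := by
      by_cases h0 : f p = 0
      · rw [if_pos h0, if_pos (hp.mp h0)]
      · rw [if_neg h0, if_neg (fun hg => h0 (hp.mpr hg))]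
    simp only [gpGo, hite]
    cases l with
    | nil => rfl
    | cons k2 t =>
      rw [ih k (h k (by rw [List.dropLast_cons₂]; exact List.mem_cons_self))
        (fun x hx => h x (by rw [List.dropLast_cons₂]; exact List.mem_cons_of_mem _ hx))]

theorem gp_congr (f g : Int → Int) (K : List Int)
    (h : ∀ x ∈ K.dropLast, (f x = 0 ↔ g x = 0)) : gp f K = gp g K := by
  cases K with
  | nil => rfl
  | cons k ks =>
    cases ks with
    | nil => rfl
    | cons k2 t =>
      show (1, k) :: gpGo f k (k2 :: t) = (1, k) :: gpGo g k (k2 :: t)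
      rw [gpGo_congr f g (k2 :: t) k (h k (by rw [List.dropLast_cons₂]; exact List.mem_cons_self))
        (fun x hx => h x (by rw [List.dropLast_cons₂]; exact List.mem_cons_of_mem _ hx))]

-- ---------- Kof ----------
theorem K_pairwise (w : Int) (ss : List Int) : (Kof w ss).Pairwise (· < ·) := PySem.List.sorted_ofList_pairwise_lt _
theorem K_mem (w : Int) (ss : List Int) (x : Int) : x ∈ Kof w ss ↔ x ∈ events w ss := by
  simp [Kof, PySem.List.mem_sorted, PySem.Set.mem_ofList]
theorem K_ne_nil (w : Int) (ss : List Int) (h : ss ≠ []) : Kof w ss ≠ [] := by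
  obtain ⟨s, hs⟩ := List.exists_mem_of_ne_nil ss h
  exact List.ne_nil_of_mem ((K_mem w ss (s - w)).2 ((mem_events w ss _).2 ⟨s, hs, Or.inl rfl⟩))

-- ---------- dict characterization ----------
theorem build_getD_aux (w : Int) (ss : List Int) (v : Int) : ∀ (d : PySem.Dict Int Int),
    (ss.foldl (fun d station =>
      let d1 := d.insert (station - w) (d.getD (station - w) 0 + 1)
      d1.insert (station + w + 1) (d1.getD (station + w + 1) 0 - 1)) d).getD v 0
      = d.getD v 0 + dOf w ss v := by
  induction ss with
  | nil => intro d; simp [dOf]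
  | cons a ss ih =>
    intro d
    rw [List.foldl_cons, ih]
    dsimp only
    simp only [PySem.Dict.getD_insert]
    have hne : ¬(a + w + 1 = a - w) := by omega
    rw [if_neg hne]
    by_cases h1 : v = a + w + 1
    · subst h1
      rw [if_pos rfl]
      simp only [dOf, List.map_cons, List.count_cons, beq_iff_eq]
      push_cast
      split_ifs <;> omega
    · rw [if_neg h1]
      by_cases h2 : v = a - w
      · subst h2
        rw [if_pos rfl]
        simp only [dOf, List.map_cons, List.count_cons, beq_iff_eq]
        push_cast
        split_ifs <;> omega
      · rw [if_neg h2]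
        simp only [dOf, List.map_cons, List.count_cons, beq_iff_eq]
        push_cast
        split_ifs <;> omega

theorem build_getD (w : Int) (ss : List Int) (v : Int) :
    (solBuild w ss).getD v 0 = dOf w ss v := by
  unfold solBuild
  rw [build_getD_aux]
  simp [PySem.Dict.getD_empty]

theorem build_mem_keys_aux (w : Int) (ss : List Int) (v : Int) : ∀ (d : PySem.Dict Int Int),
    (v ∈ (ss.foldl (fun d station =>
      let d1 := d.insert (station - w) (d.getD (station - w) 0 + 1)
      d1.insert (station + w + 1) (d1.getD (station + w + 1) 0 - 1)) d).keys
      ↔ v ∈ d.keys ∨ v ∈ events w ss) := by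
  induction ss with
  | nil => intro d; simp [events]
  | cons a ss ih =>
    intro d
    rw [List.foldl_cons, ih]
    dsimp only
    rw [PySem.Dict.mem_keys_insert, PySem.Dict.mem_keys_insert]
    simp only [events, List.flatMap_cons, List.mem_append, List.mem_cons,
      List.not_mem_nil, or_false, List.mem_flatMap]
    constructor
    · rintro ((h | h | h) | h)
      · exact Or.inr (Or.inl (Or.inr h))
      · exact Or.inr (Or.inl (Or.inl h))
      · exact Or.inl h
      · exact Or.inr (Or.inr h)
    · rintro (h | (h | h) | h)
      · exact Or.inl (Or.inr (Or.inr h))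
      · exact Or.inl (Or.inr (Or.inl h))
      · exact Or.inl (Or.inl h)
      · exact Or.inr h

theorem build_nodup_aux (w : Int) (ss : List Int) : ∀ (d : PySem.Dict Int Int),
    d.keys.Nodup →
    (ss.foldl (fun d station =>
      let d1 := d.insert (station - w) (d.getD (station - w) 0 + 1)
      d1.insert (station + w + 1) (d1.getD (station + w + 1) 0 - 1)) d).keys.Nodup := by
  induction ss with
  | nil => intro d hd; exact hd
  | cons a ss ih =>
    intro d hd
    rw [List.foldl_cons]
    exact ih _ (PySem.Dict.nodup_keys_insert _ _ _ (PySem.Dict.nodup_keys_insert _ _ _ hd))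

theorem build_mem_keys (w : Int) (ss : List Int) (v : Int) :
    v ∈ (solBuild w ss).keys ↔ v ∈ events w ss := by
  unfold solBuild
  rw [build_mem_keys_aux]
  simp [PySem.Dict.keys_empty]

theorem build_nodup (w : Int) (ss : List Int) : (solBuild w ss).keys.Nodup := by
  unfold solBuild
  exact build_nodup_aux w ss PySem.Dict.empty (by simp [PySem.Dict.keys_empty])

theorem build_sorted_keys (w : Int) (ss : List Int) :
    PySem.List.sorted (solBuild w ss).keys (fun k => k) = Kof w ss := by
  unfold Kof
  apply PySem.List.sorted_eq_sorted_of_perm _ _ _ (fun a b h => h)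
  apply (List.perm_ext_iff_of_nodup (build_nodup w ss) (PySem.Set.nodup_ofList _)).2
  intro a
  rw [PySem.Set.mem_ofList]
  exact build_mem_keys w ss a

-- ---------- the sweep ----------
theorem scgo (δ f : Int → Int) (ks : List Int) : ∀ (h : List (Int × Int)) (p : Int),
    List.IsChain (fun a b => f b = f a + δ b) (p :: ks) →
    ks.foldl (AStep δ) (h, p, f p) =
      (h ++ gpGo f p ks, ks.getLastD p, f (ks.getLastD p)) := by
  induction ks with
  | nil => intro h p hc; simp [gpGo]
  | cons k ks ih =>
    intro h p hc
    have hck := List.isChain_cons_cons.mp hc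
    rw [List.foldl_cons]
    have hstep : AStep δ (h, p, f p) k = (h ++ (if f p = 0 then [(p, k)] else []), k, f k) := by
      by_cases h0 : f p = 0 <;> simp [AStep, h0, hck.1]
    rw [hstep, ih _ _ hck.2, List.getLastD_cons]
    simp [gpGo, List.append_assoc]
theorem chainK (w : Int) (ss : List Int) :
    List.IsChain (fun a b => Cf w ss b = Cf w ss a + dOf w ss b) (Kof w ss) := by
  have aux : ∀ (T : List Int) (a : Int),
      (a :: T).Pairwise (· < ·) →
      (∀ e ∈ events w ss, e ∈ (a :: T) ∨ e ≤ a) →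
      List.IsChain (fun x y => Cf w ss y = Cf w ss x + dOf w ss y) (a :: T) := by
    intro T
    induction T with
    | nil => intro a _ _; simp
    | cons b T ih =>
      intro a hp hev
      have hab : a < b := (List.pairwise_cons.mp hp).1 b List.mem_cons_self
      have key : ∀ e ∈ events w ss, ¬(a < e ∧ e < b) := by
        intro e he hcon
        rcases hev e he with hm | hle
        · rcases List.mem_cons.mp hm with rfl | hm2
          · omega
          · rcases List.mem_cons.mp hm2 with rfl | hm3
            · omega
            · have := (List.pairwise_cons.mp (List.pairwise_cons.mp hp).2).1 _ hm3; omega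
        · omega
      refine List.isChain_cons_cons.mpr ⟨?_, ih b (List.pairwise_cons.mp hp).2 ?_⟩
      · apply Cdiff w ss a b hab
        intro s hs
        exact ⟨fun hh => key _ ((mem_events w ss _).2 ⟨s, hs, Or.inl rfl⟩) hh,
               fun hh => key _ ((mem_events w ss _).2 ⟨s, hs, Or.inr rfl⟩) hh⟩
      · intro e he
        rcases hev e he with hm | hle
        · rcases List.mem_cons.mp hm with rfl | hm2
          · exact Or.inr (le_of_lt hab)
          · exact Or.inl hm2
        · exact Or.inr (le_trans hle (le_of_lt hab))
  rcases hK : Kof w ss with _ | ⟨k, ks⟩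
  · simp
  · have hp := K_pairwise w ss; rw [hK] at hp
    apply aux ks k hp
    intro e he
    have : e ∈ Kof w ss := (K_mem w ss e).2 he
    rw [hK] at this
    exact Or.inl this
theorem headK (w : Int) (ss : List Int) (k : Int) (ks : List Int) (hk : Kof w ss = k :: ks) :
    Cf w ss k = dOf w ss k := by
  have hmin : ∀ e ∈ events w ss, k ≤ e := by
    intro e he
    have heK : e ∈ Kof w ss := (K_mem w ss e).2 he
    rw [hk] at heK
    rcases List.mem_cons.mp heK with rfl | hm
    · exact le_refl _
    · have hp := K_pairwise w ss; rw [hk] at hp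
      exact le_of_lt ((List.pairwise_cons.mp hp).1 _ hm)
  have h0 : Cf w ss (k - 1) = 0 := Czero_low w ss (k - 1) (by
    intro s hs
    have h1 := hmin (s - w) ((mem_events w ss _).2 ⟨s, hs, Or.inl rfl⟩)
    have h2 := hmin (s + w + 1) ((mem_events w ss _).2 ⟨s, hs, Or.inr rfl⟩)
    omega)
  have := Cdiff w ss (k - 1) k (by omega) (by intro s hs; constructor <;> omega)
  omega
theorem sweep_canon (w : Int) (ss : List Int) :
    (Kof w ss).foldl (AStep (dOf w ss)) ([], 1, 0) =
      (gp (Cf w ss) (Kof w ss), (Kof w ss).getLastD 1, Cf w ss ((Kof w ss).getLastD 1)) := by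
  rcases hK : Kof w ss with _ | ⟨k, ks⟩
  · have hss : ss = [] := by
      cases ss with
      | nil => rfl
      | cons a t => exact absurd hK (K_ne_nil w (a :: t) (by simp))
    subst hss
    simp [gp, Cf]
  · rw [List.foldl_cons]
    have hstep : AStep (dOf w ss) ([], 1, 0) k = ([(1, k)], k, Cf w ss k) := by
      simp [AStep, headK w ss k ks hK]
    rw [hstep]
    have hchain := chainK w ss; rw [hK] at hchain
    rw [scgo (dOf w ss) (Cf w ss) ks [(1, k)] k hchain, List.getLastD_cons]
    simp [gp]

-- ---------- A characterized ----------
theorem A_char (n : Int) (st : List Int) (w : Int) :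
    solution n st w = finishOf n w (gp (Cf w st) (Kof w st)) ((Kof w st).getLastD 1) := by
  unfold solution
  dsimp only
  have hfun : (fun pos => (solBuild w st).getD pos 0) = dOf w st :=
    funext (fun v => build_getD w st v)
  rw [build_sorted_keys, hfun, sweep_canon w st]
  dsimp only
  rw [PySem.List.foldl_add]
  unfold finishOf sumg
  exact zero_add _

-- ---------- permutation invariance ----------
theorem Cf_perm (w : Int) (st : List Int) : Cf w (PySem.List.sorted st (fun s => s)) = Cf w st := by
  have hperm := PySem.List.sorted_perm st (fun s : Int => s) false
  funext x
  unfold Cf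
  rw [hperm.countP_eq, hperm.countP_eq]
theorem Kof_perm (w : Int) (st : List Int) : Kof w (PySem.List.sorted st (fun s => s)) = Kof w st := by
  unfold Kof
  apply PySem.List.sorted_eq_sorted_of_perm _ _ _ (fun a b h => h)
  apply (List.perm_ext_iff_of_nodup (PySem.Set.nodup_ofList _) (PySem.Set.nodup_ofList _)).2
  intro a
  rw [PySem.Set.mem_ofList, PySem.Set.mem_ofList, mem_events, mem_events]
  have hmem := fun s => (PySem.List.sorted_perm st (fun s : Int => s) false).mem_iff (a := s)
  constructor
  · rintro ⟨s, hs, h⟩; exact ⟨s, (hmem s).1 hs, h⟩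
  · rintro ⟨s, hs, h⟩; exact ⟨s, (hmem s).2 hs, h⟩

-- ---------- B-side structure ----------
theorem Bg_append (w : Int) (ss : List Int) (s : Int) :
    BgFold w (ss ++ [s]) = BgStep w (BgFold w ss) s := by
  simp [BgFold, List.foldl_append]
theorem Bg_last (w : Int) (ss : List Int) (hne : ss ≠ []) (hs : ss.Pairwise (· ≤ ·)) :
    ∃ t ∈ ss, (BgFold w ss).2.1 = ivHi w t ∧ (BgFold w ss).2.2 = false ∧ ∀ u ∈ ss, u ≤ t := by
  rcases List.eq_nil_or_concat ss with rfl | ⟨ss2, s, rfl⟩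
  · exact absurd rfl hne
  · rw [List.concat_eq_append] at *
    refine ⟨s, by simp, ?_, ?_, ?_⟩
    · rw [Bg_append]; rfl
    · rw [Bg_append]; rfl
    · intro u hu
      rcases List.mem_append.mp hu with hu1 | hu2
      · exact (List.pairwise_append.mp hs).2.2 u hu1 s (by simp)
      · simp at hu2; omega

-- ---------- B's pass vs the flagged gap-collecting fold ----------
theorem lockstep2 (w : Int) (l : List Int) : ∀ (g : List (Int × Int)) (cur : Int),
    l.foldl (fun (st : Int × Int) s =>
        (if st.2 < ivLo w s then st.1 + solCeil w st.2 (ivLo w s) else st.1, ivHi w s))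
      (sumg w g, cur) =
      (sumg w (l.foldl (NStep w) (g, cur)).1, (l.foldl (NStep w) (g, cur)).2) := by
  induction l with
  | nil => intro g cur; simp
  | cons s l ih =>
    intro g cur
    rw [List.foldl_cons, List.foldl_cons]
    by_cases hc : cur < ivLo w s
    · have hN : NStep w (g, cur) s = (g ++ [(cur, ivLo w s)], ivHi w s) := by
        simp only [NStep, if_pos hc]
      have hsum : sumg w g + solCeil w cur (ivLo w s) = sumg w (g ++ [(cur, ivLo w s)]) := by
        simp [sumg]
      rw [hN]
      dsimp only
      rw [if_pos hc, hsum]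
      exact ih (g ++ [(cur, ivLo w s)]) (ivHi w s)
    · have hN : NStep w (g, cur) s = (g, ivHi w s) := by
        simp only [NStep, if_neg hc]
      rw [hN]
      dsimp only
      rw [if_neg hc]
      exact ih g (ivHi w s)

theorem tail_agree (w : Int) (l : List Int) : ∀ (g : List (Int × Int)) (c : Int),
    l.foldl (BgStep w) (g, c, false) =
      ((l.foldl (NStep w) (g, c)).1, (l.foldl (NStep w) (g, c)).2, false) := by
  induction l with
  | nil => intro g c; simp
  | cons s l ih =>
    intro g c
    rw [List.foldl_cons, List.foldl_cons]
    have hstep : BgStep w (g, c, false) s = ((NStep w (g, c) s).1, (NStep w (g, c) s).2, false) := by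
      simp [BgStep, NStep]
    rw [hstep, ih]

theorem N_prefix (w : Int) (l : List Int) : ∀ (g0 : List (Int × Int)) (c : Int),
    l.foldl (NStep w) (g0, c) =
      (g0 ++ (l.foldl (NStep w) ([], c)).1, (l.foldl (NStep w) ([], c)).2) := by
  induction l with
  | nil => intro g0 c; simp
  | cons s l ih =>
    intro g0 c
    rw [List.foldl_cons, List.foldl_cons]
    by_cases hc : c < ivLo w s
    · have h1 : NStep w (g0, c) s = (g0 ++ [(c, ivLo w s)], ivHi w s) := by
        simp only [NStep, if_pos hc]
      have h2 : NStep w ([], c) s = ([(c, ivLo w s)], ivHi w s) := by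
        simp only [NStep, if_pos hc, List.nil_append]
      rw [h1, h2, ih (g0 ++ [(c, ivLo w s)]), ih [(c, ivLo w s)]]
      simp [List.append_assoc]
    · have h1 : NStep w (g0, c) s = (g0, ivHi w s) := by simp only [NStep, if_neg hc]
      have h2 : NStep w ([], c) s = ([], ivHi w s) := by simp only [NStep, if_neg hc]
      rw [h1, h2, ih g0]

theorem sumg_append (w : Int) (a b : List (Int × Int)) :
    sumg w (a ++ b) = sumg w a + sumg w b := by
  simp [sumg]

theorem NB_agree (w : Int) (ss : List Int) (hw : 0 ≤ w) (h1 : ∀ s ∈ ss, -w < s) :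
    sumg w (ss.foldl (NStep w) ([], 1)).1 = sumg w (BgFold w ss).1 ∧
      (ss.foldl (NStep w) ([], 1)).2 = (BgFold w ss).2.1 := by
  cases ss with
  | nil => exact ⟨rfl, rfl⟩
  | cons s rest =>
    have hs1 : -w < s := h1 s List.mem_cons_self
    have hB : BgFold w (s :: rest) =
        rest.foldl (BgStep w) ([(1, ivLo w s)], ivHi w s, false) := by
      unfold BgFold
      rw [List.foldl_cons]
      simp [BgStep]
    rw [hB, tail_agree, N_prefix w rest [(1, ivLo w s)] (ivHi w s)]
    rw [List.foldl_cons]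
    by_cases hc : (1 : Int) < ivLo w s
    · have hN : NStep w ([], 1) s = ([(1, ivLo w s)], ivHi w s) := by
        simp only [NStep, if_pos hc, List.nil_append]
      rw [hN, N_prefix w rest [(1, ivLo w s)] (ivHi w s)]
      exact ⟨rfl, rfl⟩
    · have hN : NStep w ([], 1) s = ([], ivHi w s) := by
        simp only [NStep, if_neg hc]
      rw [hN]
      refine ⟨?_, rfl⟩
      rw [sumg_append]
      have h0 : sumg w [(1, ivLo w s)] = 0 := by
        simp [sumg, first_gap_zero w s hw hs1 hc]
      rw [h0, zero_add]

-- ---------- B characterized ----------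
theorem B_char (n : Int) (st : List Int) (w : Int) (hw : 0 ≤ w) (h1 : ∀ s ∈ st, -w < s) :
    solution_alt n st w =
      finishOf n w (BgFold w (PySem.List.sorted st (fun s => s))).1
        (BgFold w (PySem.List.sorted st (fun s => s))).2.1 := by
  unfold solution_alt
  dsimp only
  have hfun : (fun (st2 : Int × Int) (s : Int) =>
      (if st2.2 < s - w then
          st2.1 + PySem.Int.floordiv (s - w - st2.2 + (2 * w + 1) - 1) (2 * w + 1)
        else st2.1, s + w + 1))
      = (fun (st2 : Int × Int) s =>
      (if st2.2 < ivLo w s then st2.1 + solCeil w st2.2 (ivLo w s) else st2.1, ivHi w s)) := by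
    funext st2 s
    rw [ivLo_of_nonneg w s hw, ivHi_of_nonneg w s hw, ceil_eq w st2.2 (s - w) hw]
  rw [hfun]
  rw [show ((0 : Int), (1 : Int)) = (sumg w ([] : List (Int × Int)), (1 : Int)) by simp [sumg]]
  rw [lockstep2]
  have hmem : ∀ s ∈ PySem.List.sorted st (fun s : Int => s), -w < s := by
    intro s hs
    exact h1 s ((PySem.List.sorted_perm st (fun s : Int => s) false).mem_iff.1 hs)
  obtain ⟨hsum, hcur⟩ := NB_agree w (PySem.List.sorted st (fun s => s)) hw hmem
  rw [hsum, hcur]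
  unfold finishOf
  by_cases hfin : (BgFold w (PySem.List.sorted st (fun s => s))).2.1 < n + 1
  · rw [if_pos (by omega : (BgFold w (PySem.List.sorted st (fun s => s))).2.1 ≤ n), if_pos hfin]
    rw [sumg_append]
    have := ceil_eq w (BgFold w (PySem.List.sorted st (fun s => s))).2.1 (n + 1) hw
    simp only [sumg, List.map_cons, List.map_nil, List.sum_cons, List.sum_nil, add_zero]
    rw [← this]
  · rw [if_neg (by omega : ¬ (BgFold w (PySem.List.sorted st (fun s => s))).2.1 ≤ n), if_neg hfin]

-- ---------- main induction ----------
theorem main_ind (w : Int) (ss : List Int) : ss.Pairwise (· ≤ ·) →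
    gp (Cf w ss) (Kof w ss) = (BgFold w ss).1 ∧
      (Kof w ss).getLastD 1 = (BgFold w ss).2.1 := by
  induction ss using List.reverseRecOn with
  | nil => intro _; exact ⟨rfl, rfl⟩
  | append_singleton ss s ih =>
    intro hs2
    have hss : ss.Pairwise (· ≤ ·) := (List.pairwise_append.mp hs2).1
    have hle : ∀ u ∈ ss, u ≤ s := fun u hu => (List.pairwise_append.mp hs2).2.2 u hu s (by simp)
    have hLH : ivLo w s < ivHi w s := ivLo_lt_ivHi w s
    rw [Bg_append]
    rcases eq_or_ne ss [] with rfl | hne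
    · -- singleton station
      have hK1 : Kof w ([] ++ [s]) = [ivLo w s, ivHi w s] := by
        apply PySem.List.sorted_eq_of_perm_of_pairwise_lt
        · refine (List.perm_ext_iff_of_nodup ?_ (PySem.Set.nodup_ofList _)).2 ?_
          · simp [List.nodup_cons]; omega
          · intro a
            rw [PySem.Set.mem_ofList, mem_events]
            simp only [List.mem_cons, List.not_mem_nil, or_false, List.nil_append,
              List.mem_singleton]
            constructor
            · rintro h
              exact ⟨s, rfl, (lohi_set w s a).2 h⟩
            · rintro ⟨t, ht, h⟩
              rw [ht] at h
              exact (lohi_set w s a).1 h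
        · simp [hLH]
      have hfL : Cf w ([] ++ [s]) (ivLo w s) ≠ 0 :=
        Ccover w ([] ++ [s]) (ivLo w s) s (by simp) (le_refl _) hLH
      constructor
      · rw [hK1]
        show (1, ivLo w s) :: gpGo (Cf w ([] ++ [s])) (ivLo w s) [ivHi w s] = _
        have hfL2 : Cf w [s] (ivLo w s) ≠ 0 := hfL
        rw [show gpGo (Cf w ([] ++ [s])) (ivLo w s) [ivHi w s] = [] by
          simp [gpGo, if_neg hfL2]]
        simp [BgStep, BgFold]
      · rw [hK1]
        simp [BgStep, BgFold, List.getLastD_cons]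
    · -- ss nonempty
      obtain ⟨t0, ht0, hcur, hflag, hmax⟩ := Bg_last w ss hne hss
      obtain ⟨hgp, hlast⟩ := ih hss
      have hKp := K_pairwise w ss
      have hKne := K_ne_nil w ss hne
      have hevle : ∀ e ∈ events w ss, e ≤ (BgFold w ss).2.1 := by
        intro e he
        rw [hcur]
        obtain ⟨u, hu, hor⟩ := (mem_events w ss e).1 he
        have h1 : e ≤ ivHi w u := by unfold ivHi; rcases hor with rfl | rfl <;> omega
        exact le_trans h1 (ivHi_mono w u t0 (hmax u hu))
      have hKle : ∀ x ∈ Kof w ss, x ≤ (BgFold w ss).2.1 :=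
        fun x hx => hevle x ((K_mem w ss x).1 hx)
      have hcurK : (BgFold w ss).2.1 ∈ Kof w ss := by
        rw [hcur]
        exact (K_mem w ss _).2 ((mem_events w ss _).2 ⟨t0, ht0, (lohi_set w t0 _).2 (Or.inr rfl)⟩)
      have hLt0 : ivLo w t0 ≤ ivLo w s := ivLo_mono w t0 s (hle t0 ht0)
      have hHcur : (BgFold w ss).2.1 ≤ ivHi w s := by
        rw [hcur]; exact ivHi_mono w t0 s (hle t0 ht0)
      have hcov : ∀ x, ivLo w t0 ≤ x → x < (BgFold w ss).2.1 → Cf w ss x ≠ 0 := by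
        intro x h1 h2
        rw [hcur] at h2
        exact Ccover w ss x t0 ht0 h1 h2
      have hcov' : ∀ x, ivLo w s ≤ x → x < ivHi w s → Cf w (ss ++ [s]) x ≠ 0 :=
        fun x h1 h2 => Ccover w (ss ++ [s]) x s (by simp) h1 h2
      have hflt : ∀ x, x < ivLo w s → Cf w (ss ++ [s]) x = Cf w ss x :=
        fun x hx => Capp_lt w ss s x hx
      have hfcur0 : Cf w ss ((BgFold w ss).2.1) = 0 := by
        apply Czero_high
        intro u hu
        have h1 := hevle (u - w) ((mem_events w ss _).2 ⟨u, hu, Or.inl rfl⟩)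
        have h2 := hevle (u + w + 1) ((mem_events w ss _).2 ⟨u, hu, Or.inr rfl⟩)
        exact ⟨h1, h2⟩
      obtain ⟨k, ks, hK⟩ := List.exists_cons_of_ne_nil hKne
      have hkmin : ∀ x ∈ Kof w ss, k ≤ x := by
        intro x hx
        rw [hK] at hx
        rcases List.mem_cons.mp hx with rfl | hm
        · exact le_refl _
        · have hp2 := hKp; rw [hK] at hp2
          exact le_of_lt ((List.pairwise_cons.mp hp2).1 _ hm)
      have hlk : ks.getLastD k = (BgFold w ss).2.1 := by
        have h0 := hlast
        rw [hK, List.getLastD_cons] at h0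
        exact h0
      by_cases hov : (BgFold w ss).2.1 < ivLo w s
      · -- DISJOINT: new component
        have hKLH : (Kof w ss ++ [ivLo w s, ivHi w s]).Pairwise (· < ·) := by
          rw [List.pairwise_append]
          refine ⟨hKp, by simp [hLH], ?_⟩
          intro a ha b hb
          simp only [List.mem_cons, List.not_mem_nil, or_false] at hb
          rcases hb with rfl | rfl
          · exact lt_of_le_of_lt (hKle a ha) hov
          · exact lt_of_le_of_lt (hKle a ha) (lt_trans hov hLH)
        have hK' : Kof w (ss ++ [s]) = Kof w ss ++ [ivLo w s, ivHi w s] := by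
          apply PySem.List.sorted_eq_of_perm_of_pairwise_lt
          · refine (List.perm_ext_iff_of_nodup
              (hKLH.imp (fun h => ne_of_lt h)) (PySem.Set.nodup_ofList _)).2 ?_
            intro a
            rw [PySem.Set.mem_ofList, events_append, List.mem_append, List.mem_append]
            have h2 : a ∈ [ivLo w s, ivHi w s] ↔ a ∈ [s - w, s + w + 1] := by
              simp only [List.mem_cons, List.not_mem_nil, or_false]
              exact Iff.symm (lohi_set w s a)
            rw [h2]
            exact or_congr_left (K_mem w ss a)
          · exact hKLH
        have hfcur' : Cf w (ss ++ [s]) ((BgFold w ss).2.1) = 0 := by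
          rw [hflt _ hov]; exact hfcur0
        have hfL : Cf w (ss ++ [s]) (ivLo w s) ≠ 0 := hcov' _ (le_refl _) hLH
        constructor
        · rw [hK', hK, List.cons_append]
          show (1, k) :: gpGo (Cf w (ss ++ [s])) k (ks ++ [ivLo w s, ivHi w s]) = _
          rw [gpGo_append, hlk]
          rw [show gpGo (Cf w (ss ++ [s])) ((BgFold w ss).2.1) [ivLo w s, ivHi w s]
              = [((BgFold w ss).2.1, ivLo w s)] by
            simp [gpGo, hfcur', hfL]]
          rw [show gpGo (Cf w (ss ++ [s])) k ks = gpGo (Cf w ss) k ks by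
            apply gpGo_congr
            · rw [hflt k (lt_of_le_of_lt (hKle k (by rw [hK]; exact List.mem_cons_self)) hov)]
            · intro x hx
              have hxK : x ∈ Kof w ss := by
                rw [hK]; exact List.mem_cons_of_mem _ ((List.dropLast_sublist ks).subset hx)
              rw [hflt x (lt_of_le_of_lt (hKle x hxK) hov)]]
          rw [show (BgStep w (BgFold w ss) s).1
              = (BgFold w ss).1 ++ [((BgFold w ss).2.1, ivLo w s)] by
            simp [BgStep, hflag, hov]]
          rw [← hgp, hK]
          simp [gp]
        · rw [hK', lastD_append]
          simp [BgStep, List.getLastD_cons]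
      · -- OVERLAP
        have hovle : ivLo w s ≤ (BgFold w ss).2.1 := not_lt.mp hov
        have hBstep : BgStep w (BgFold w ss) s = ((BgFold w ss).1, ivHi w s, false) := by
          simp [BgStep, hflag, hov]
        have hpoint : ∀ x ∈ (Kof w ss).dropLast,
            (Cf w (ss ++ [s]) x = 0 ↔ Cf w ss x = 0) := by
          intro x hx
          have hxlt : x < (BgFold w ss).2.1 := by
            have := dropLast_lt_getLastD (Kof w ss) 1 x hKp hx
            rw [hlast] at this; exact this
          by_cases hxL : x < ivLo w s
          · rw [hflt x hxL]
          · exact iff_of_false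
              (hcov' x (not_lt.mp hxL) (lt_of_lt_of_le hxlt hHcur))
              (hcov x (le_trans hLt0 (not_lt.mp hxL)) hxlt)
        have hgoK : gpGo (Cf w (ss ++ [s])) k ks = gpGo (Cf w ss) k ks := by
          cases ks with
          | nil => rfl
          | cons k2 t =>
            apply gpGo_congr
            · exact hpoint k (by rw [hK, List.dropLast_cons₂]; exact List.mem_cons_self)
            · intro x hx
              exact hpoint x (by rw [hK, List.dropLast_cons₂]; exact List.mem_cons_of_mem _ hx)
        have hfL' : Cf w (ss ++ [s]) (ivLo w s) ≠ 0 := hcov' _ (le_refl _) hLH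
        by_cases hLK : ivLo w s ∈ Kof w ss
        · by_cases hHc : ivHi w s = (BgFold w ss).2.1
          · -- (i) key set unchanged
            have hK' : Kof w (ss ++ [s]) = Kof w ss := by
              apply PySem.List.sorted_eq_of_perm_of_pairwise_lt
              · refine (List.perm_ext_iff_of_nodup
                  (hKp.imp (fun h => ne_of_lt h)) (PySem.Set.nodup_ofList _)).2 ?_
                intro a
                rw [PySem.Set.mem_ofList, events_append, List.mem_append]
                constructor
                · intro ha; exact Or.inl ((K_mem w ss a).1 ha)
                · rintro (ha | ha)
                  · exact (K_mem w ss a).2 ha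
                  · simp only [List.mem_cons, List.not_mem_nil, or_false] at ha
                    rcases (lohi_set w s a).1 ha with rfl | rfl
                    · exact hLK
                    · rw [hHc]; exact hcurK
              · exact hKp
            refine ⟨?_, ?_⟩
            · rw [hK', gp_congr _ _ _ hpoint, hgp, hBstep]
            · rw [hK', hlast, hBstep]
              exact hHc.symm
          · -- (ii) right endpoint appended
            have hcurH : (BgFold w ss).2.1 < ivHi w s :=
              lt_of_le_of_ne hHcur (fun he => hHc he.symm)
            have hKH : (Kof w ss ++ [ivHi w s]).Pairwise (· < ·) := by
              rw [List.pairwise_append]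
              refine ⟨hKp, by simp, ?_⟩
              intro a ha b hb
              simp only [List.mem_singleton] at hb
              subst hb
              exact lt_of_le_of_lt (hKle a ha) hcurH
            have hK' : Kof w (ss ++ [s]) = Kof w ss ++ [ivHi w s] := by
              apply PySem.List.sorted_eq_of_perm_of_pairwise_lt
              · refine (List.perm_ext_iff_of_nodup
                  (hKH.imp (fun h => ne_of_lt h)) (PySem.Set.nodup_ofList _)).2 ?_
                intro a
                rw [PySem.Set.mem_ofList, events_append, List.mem_append, List.mem_append]
                constructor
                · rintro (ha | ha)
                  · exact Or.inl ((K_mem w ss a).1 ha)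
                  · simp only [List.mem_singleton] at ha
                    subst ha
                    have := (lohi_set w s (ivHi w s)).2 (Or.inr rfl)
                    exact Or.inr (by rcases this with h | h <;> simp [h])
                · rintro (ha | ha)
                  · exact Or.inl ((K_mem w ss a).2 ha)
                  · simp only [List.mem_cons, List.not_mem_nil, or_false] at ha
                    rcases (lohi_set w s a).1 ha with rfl | rfl
                    · exact Or.inl hLK
                    · exact Or.inr (by simp)
              · exact hKH
            refine ⟨?_, ?_⟩
            · rw [hK', hK, List.cons_append]
              show (1, k) :: gpGo (Cf w (ss ++ [s])) k (ks ++ [ivHi w s]) = _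
              rw [gpGo_append, hlk]
              rw [show gpGo (Cf w (ss ++ [s])) ((BgFold w ss).2.1) [ivHi w s] = [] by
                simp only [gpGo, if_neg (hcov' _ hovle hcurH), List.nil_append]]
              rw [hgoK, hBstep]
              dsimp only
              rw [← hgp, hK]
              simp [gp]
            · rw [hK', lastD_append, hBstep]
              simp [List.getLastD_cons]
        · -- ivLo w s is a fresh key: split the key list at it
          have hsplit : (Kof w ss).takeWhile (fun x => decide (x < ivLo w s))
              ++ (Kof w ss).dropWhile (fun x => decide (x < ivLo w s)) = Kof w ss :=
            List.takeWhile_append_dropWhile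
          have hK1lt : ∀ x ∈ (Kof w ss).takeWhile (fun x => decide (x < ivLo w s)),
              x < ivLo w s := by
            intro x hx; have := List.mem_takeWhile_imp hx; simpa using this
          have hK2ge : ∀ x ∈ (Kof w ss).dropWhile (fun x => decide (x < ivLo w s)),
              ivLo w s ≤ x := fun x hx => mem_dropWhile_sorted _ _ hKp x hx
          have hK1K : ∀ x ∈ (Kof w ss).takeWhile (fun x => decide (x < ivLo w s)),
              x ∈ Kof w ss := fun x hx => (List.takeWhile_sublist _).subset hx
          have hK2K : ∀ x ∈ (Kof w ss).dropWhile (fun x => decide (x < ivLo w s)),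
              x ∈ Kof w ss := fun x hx => (List.dropWhile_sublist _).subset hx
          have hK2gt : ∀ x ∈ (Kof w ss).dropWhile (fun x => decide (x < ivLo w s)),
              ivLo w s < x := by
            intro x hx
            exact lt_of_le_of_ne (hK2ge x hx) (fun he => hLK (he ▸ hK2K x hx))
          have hcur2 : (BgFold w ss).2.1 ∈ (Kof w ss).dropWhile (fun x => decide (x < ivLo w s)) := by
            have h0 := hcurK
            rw [← hsplit] at h0
            rcases List.mem_append.mp h0 with h1 | h1
            · exact absurd (hK1lt _ h1) (by omega)
            · exact h1
          have hK2ne : (Kof w ss).dropWhile (fun x => decide (x < ivLo w s)) ≠ [] :=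
            List.ne_nil_of_mem hcur2
          have hK1p : ((Kof w ss).takeWhile (fun x => decide (x < ivLo w s))).Pairwise (· < ·) :=
            List.Pairwise.sublist (List.takeWhile_sublist _) hKp
          have hK2p : ((Kof w ss).dropWhile (fun x => decide (x < ivLo w s))).Pairwise (· < ·) :=
            List.Pairwise.sublist (List.dropWhile_sublist _) hKp
          have hlo0K : ivLo w t0 ∈ Kof w ss :=
            (K_mem w ss _).2 ((mem_events w ss _).2 ⟨t0, ht0, (lohi_set w t0 _).2 (Or.inl rfl)⟩)
          have hlo0L : ivLo w t0 < ivLo w s :=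
            lt_of_le_of_ne hLt0 (fun he => hLK (he ▸ hlo0K))
          have hlo0K1 : ivLo w t0 ∈ (Kof w ss).takeWhile (fun x => decide (x < ivLo w s)) :=
            mem_takeWhile_sorted _ _ hKp _ hlo0K hlo0L
          have hK1ne : (Kof w ss).takeWhile (fun x => decide (x < ivLo w s)) ≠ [] :=
            List.ne_nil_of_mem hlo0K1
          have hp1K1 : ((Kof w ss).takeWhile (fun x => decide (x < ivLo w s))).getLastD 1
              ∈ (Kof w ss).takeWhile (fun x => decide (x < ivLo w s)) := mem_getLastD _ _ hK1ne
          have hp1L : ((Kof w ss).takeWhile (fun x => decide (x < ivLo w s))).getLastD 1 < ivLo w s :=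
            hK1lt _ hp1K1
          have hp1lo : ivLo w t0 ≤ ((Kof w ss).takeWhile (fun x => decide (x < ivLo w s))).getLastD 1 :=
            le_getLastD _ 1 _ hK1p hlo0K1
          have hfp1 : Cf w ss (((Kof w ss).takeWhile (fun x => decide (x < ivLo w s))).getLastD 1) ≠ 0 :=
            hcov _ hp1lo (lt_of_lt_of_le hp1L hovle)
          have hfp1' : Cf w (ss ++ [s]) (((Kof w ss).takeWhile (fun x => decide (x < ivLo w s))).getLastD 1) ≠ 0 := by
            rw [hflt _ hp1L]; exact hfp1
          have hlast2 : ∀ d, ((Kof w ss).dropWhile (fun x => decide (x < ivLo w s))).getLastD d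
              = (BgFold w ss).2.1 := by
            intro d
            have h0 := hlast
            rw [← hsplit, lastD_append] at h0
            rw [getLastD_irrel _ d (((Kof w ss).takeWhile (fun x => decide (x < ivLo w s))).getLastD 1) hK2ne]
            exact h0
          have hkL : k < ivLo w s := lt_of_le_of_lt (hkmin _ hlo0K) hlo0L
          have hK1c : (Kof w ss).takeWhile (fun x => decide (x < ivLo w s))
              = k :: ks.takeWhile (fun x => decide (x < ivLo w s)) := by
            rw [hK, List.takeWhile_cons_of_pos (by simpa using hkL)]
          have hks : ks.takeWhile (fun x => decide (x < ivLo w s))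
              ++ (Kof w ss).dropWhile (fun x => decide (x < ivLo w s)) = ks := by
            have h1 := hsplit.trans hK
            rw [hK1c, List.cons_append] at h1
            simpa using h1
          have hp1T : (ks.takeWhile (fun x => decide (x < ivLo w s))).getLastD k
              = ((Kof w ss).takeWhile (fun x => decide (x < ivLo w s))).getLastD 1 := by
            rw [hK1c, List.getLastD_cons]
          have hgoK2 : gpGo (Cf w ss)
              (((Kof w ss).takeWhile (fun x => decide (x < ivLo w s))).getLastD 1)
              ((Kof w ss).dropWhile (fun x => decide (x < ivLo w s))) = [] := by
            apply gpGo_nil_of _ _ _ hfp1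
            intro x hx
            have hx2 := (List.dropLast_sublist _).subset hx
            have hxlt : x < (BgFold w ss).2.1 := by
              have := dropLast_lt_getLastD _ 1 x hK2p hx
              rw [hlast2 1] at this; exact this
            exact hcov x (le_trans hLt0 (hK2ge x hx2)) hxlt
          have hold : gp (Cf w ss) (Kof w ss)
              = (1, k) :: gpGo (Cf w ss) k (ks.takeWhile (fun x => decide (x < ivLo w s))) := by
            rw [hK]
            show (1, k) :: gpGo (Cf w ss) k ks = _
            conv_lhs => rw [← hks]
            rw [gpGo_append, hp1T, hgoK2, List.append_nil]
          have hgo1 : gpGo (Cf w (ss ++ [s])) k (ks.takeWhile (fun x => decide (x < ivLo w s)))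
              = gpGo (Cf w ss) k (ks.takeWhile (fun x => decide (x < ivLo w s))) := by
            apply gpGo_congr
            · rw [hflt k hkL]
            · intro x hx
              have hx1 : x ∈ (Kof w ss).takeWhile (fun x => decide (x < ivLo w s)) := by
                rw [hK1c]
                exact List.mem_cons_of_mem _ ((List.dropLast_sublist _).subset hx)
              rw [hflt x (hK1lt x hx1)]
          by_cases hHc : ivHi w s = (BgFold w ss).2.1
          · -- (iii) insert the left endpoint only
            have hK'p : ((Kof w ss).takeWhile (fun x => decide (x < ivLo w s))
                ++ (ivLo w s :: (Kof w ss).dropWhile (fun x => decide (x < ivLo w s)))).Pairwise (· < ·) := by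
              rw [List.pairwise_append]
              refine ⟨hK1p, ?_, ?_⟩
              · rw [List.pairwise_cons]; exact ⟨hK2gt, hK2p⟩
              · intro a ha b hb
                rcases List.mem_cons.mp hb with rfl | hb2
                · exact hK1lt a ha
                · exact lt_trans (hK1lt a ha) (hK2gt b hb2)
            have hK' : Kof w (ss ++ [s]) = (Kof w ss).takeWhile (fun x => decide (x < ivLo w s))
                ++ (ivLo w s :: (Kof w ss).dropWhile (fun x => decide (x < ivLo w s))) := by
              apply PySem.List.sorted_eq_of_perm_of_pairwise_lt
              · refine (List.perm_ext_iff_of_nodup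
                  (hK'p.imp (fun h => ne_of_lt h)) (PySem.Set.nodup_ofList _)).2 ?_
                intro a
                rw [PySem.Set.mem_ofList, events_append, List.mem_append, List.mem_append]
                constructor
                · rintro (ha | ha)
                  · exact Or.inl ((K_mem w ss a).1 (hK1K a ha))
                  · rcases List.mem_cons.mp ha with rfl | ha2
                    · have := (lohi_set w s (ivLo w s)).2 (Or.inl rfl)
                      exact Or.inr (by rcases this with h | h <;> simp [h])
                    · exact Or.inl ((K_mem w ss a).1 (hK2K a ha2))
                · rintro (ha | ha)
                  · have haK := (K_mem w ss a).2 ha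
                    rw [← hsplit] at haK
                    rcases List.mem_append.mp haK with h1 | h1
                    · exact Or.inl h1
                    · exact Or.inr (List.mem_cons_of_mem _ h1)
                  · simp only [List.mem_cons, List.not_mem_nil, or_false] at ha
                    rcases (lohi_set w s a).1 ha with rfl | rfl
                    · exact Or.inr List.mem_cons_self
                    · rw [hHc]; exact Or.inr (List.mem_cons_of_mem _ hcur2)
              · exact hK'p
            have hgoLK2 : gpGo (Cf w (ss ++ [s]))
                (((Kof w ss).takeWhile (fun x => decide (x < ivLo w s))).getLastD 1)
                (ivLo w s :: (Kof w ss).dropWhile (fun x => decide (x < ivLo w s))) = [] := by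
              apply gpGo_nil_of _ _ _ hfp1'
              intro x hx
              rw [List.dropLast_cons_of_ne_nil hK2ne] at hx
              rcases List.mem_cons.mp hx with rfl | hx2
              · exact hfL'
              · have hx3 := (List.dropLast_sublist _).subset hx2
                have hxlt : x < (BgFold w ss).2.1 := by
                  have := dropLast_lt_getLastD _ 1 x hK2p hx2
                  rw [hlast2 1] at this; exact this
                exact hcov' x (hK2ge x hx3) (by omega)
            refine ⟨?_, ?_⟩
            · rw [hK', hK1c, List.cons_append]
              show (1, k) :: gpGo (Cf w (ss ++ [s])) k
                  (ks.takeWhile (fun x => decide (x < ivLo w s))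
                    ++ (ivLo w s :: (Kof w ss).dropWhile (fun x => decide (x < ivLo w s)))) = _
              rw [gpGo_append, hp1T, hgoLK2, List.append_nil, hgo1]
              rw [hBstep]
              dsimp only
              rw [← hgp, hold]
            · rw [hK', lastD_append, List.getLastD_cons, hlast2, hBstep]
              exact hHc.symm
          · -- (iv) insert left endpoint and append right endpoint
            have hcurH : (BgFold w ss).2.1 < ivHi w s :=
              lt_of_le_of_ne hHcur (fun he => hHc he.symm)
            have hK'p : ((Kof w ss).takeWhile (fun x => decide (x < ivLo w s))
                ++ (ivLo w s :: ((Kof w ss).dropWhile (fun x => decide (x < ivLo w s)) ++ [ivHi w s]))).Pairwise (· < ·) := by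
              rw [List.pairwise_append]
              refine ⟨hK1p, ?_, ?_⟩
              · rw [List.pairwise_cons]
                refine ⟨?_, ?_⟩
                · intro b hb
                  rcases List.mem_append.mp hb with h1 | h1
                  · exact hK2gt b h1
                  · simp only [List.mem_singleton] at h1; subst h1
                    exact lt_of_le_of_lt hovle hcurH
                · rw [List.pairwise_append]
                  refine ⟨hK2p, by simp, ?_⟩
                  intro a ha b hb
                  simp only [List.mem_singleton] at hb; subst hb
                  exact lt_of_le_of_lt (hKle a (hK2K a ha)) hcurH
              · intro a ha b hb
                have haL := hK1lt a ha
                rcases List.mem_cons.mp hb with rfl | hb2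
                · exact haL
                · rcases List.mem_append.mp hb2 with h1 | h1
                  · exact lt_trans haL (hK2gt b h1)
                  · simp only [List.mem_singleton] at h1; subst h1
                    exact lt_trans haL (lt_of_le_of_lt hovle hcurH)
            have hK' : Kof w (ss ++ [s]) = (Kof w ss).takeWhile (fun x => decide (x < ivLo w s))
                ++ (ivLo w s :: ((Kof w ss).dropWhile (fun x => decide (x < ivLo w s)) ++ [ivHi w s])) := by
              apply PySem.List.sorted_eq_of_perm_of_pairwise_lt
              · refine (List.perm_ext_iff_of_nodup
                  (hK'p.imp (fun h => ne_of_lt h)) (PySem.Set.nodup_ofList _)).2 ?_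
                intro a
                rw [PySem.Set.mem_ofList, events_append, List.mem_append, List.mem_append]
                constructor
                · rintro (ha | ha)
                  · exact Or.inl ((K_mem w ss a).1 (hK1K a ha))
                  · rcases List.mem_cons.mp ha with rfl | ha2
                    · have := (lohi_set w s (ivLo w s)).2 (Or.inl rfl)
                      exact Or.inr (by rcases this with h | h <;> simp [h])
                    · rcases List.mem_append.mp ha2 with h1 | h1
                      · exact Or.inl ((K_mem w ss a).1 (hK2K a h1))
                      · simp only [List.mem_singleton] at h1; subst h1
                        have := (lohi_set w s (ivHi w s)).2 (Or.inr rfl)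
                        exact Or.inr (by rcases this with h | h <;> simp [h])
                · rintro (ha | ha)
                  · have haK := (K_mem w ss a).2 ha
                    rw [← hsplit] at haK
                    rcases List.mem_append.mp haK with h1 | h1
                    · exact Or.inl h1
                    · exact Or.inr (List.mem_cons_of_mem _ (List.mem_append.2 (Or.inl h1)))
                  · simp only [List.mem_cons, List.not_mem_nil, or_false] at ha
                    rcases (lohi_set w s a).1 ha with rfl | rfl
                    · exact Or.inr List.mem_cons_self
                    · exact Or.inr (List.mem_cons_of_mem _ (List.mem_append.2 (Or.inr (by simp))))
              · exact hK'p
            have hgoLK2H : gpGo (Cf w (ss ++ [s]))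
                (((Kof w ss).takeWhile (fun x => decide (x < ivLo w s))).getLastD 1)
                (ivLo w s :: ((Kof w ss).dropWhile (fun x => decide (x < ivLo w s)) ++ [ivHi w s])) = [] := by
              apply gpGo_nil_of _ _ _ hfp1'
              intro x hx
              have hd : (ivLo w s :: ((Kof w ss).dropWhile (fun x => decide (x < ivLo w s)) ++ [ivHi w s])).dropLast
                  = ivLo w s :: (Kof w ss).dropWhile (fun x => decide (x < ivLo w s)) := by
                rw [List.dropLast_cons_of_ne_nil (by simp), List.dropLast_concat]
              rw [hd] at hx
              rcases List.mem_cons.mp hx with rfl | hx2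
              · exact hfL'
              · exact hcov' x (hK2ge x hx2) (lt_of_le_of_lt (hKle x (hK2K x hx2)) hcurH)
            refine ⟨?_, ?_⟩
            · rw [hK', hK1c, List.cons_append]
              show (1, k) :: gpGo (Cf w (ss ++ [s])) k
                  (ks.takeWhile (fun x => decide (x < ivLo w s))
                    ++ (ivLo w s :: ((Kof w ss).dropWhile (fun x => decide (x < ivLo w s)) ++ [ivHi w s]))) = _
              rw [gpGo_append, hp1T, hgoLK2H, List.append_nil, hgo1]
              rw [hBstep]
              dsimp only
              rw [← hgp, hold]
            · rw [hK', lastD_append, List.getLastD_cons, lastD_append, hBstep]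
              rfl

-- ===== VERDICT (by name: the statement is the Claim_ definition above) =====
theorem solution_spec : Claim_equal_solution := by
  intro n st w _ hpre
  unfold Spec_solution
  have hsp : (PySem.List.sorted st (fun s : Int => s)).Pairwise (· ≤ ·) := by
    have := PySem.List.sorted_pairwise st (fun s : Int => s)
    simpa using this
  have hmain := main_ind w (PySem.List.sorted st (fun s => s)) hsp
  rw [A_char, B_char n st w hpre.1 hpre.2, ← Cf_perm, ← Kof_perm, hmain.1, hmain.2]
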